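-- pv_equiv track=rewrite | github.com/breno-ceribeli/regex-central | backend/src/builder/builder.py | _escape_char_class_chars
-- ===== SOURCE A (Python) =====
-- def _escape_char_class_chars(chars: str) -> str:
--     """
--     Escapes special characters for use inside character classes.
--
--     Inside character classes [], certain characters have special meaning and need escaping:
--     - ] closes the character class (always needs escaping)
--     - \ is the escape character (always needs escaping)
--     - ^ negates the class (only when at the start)
--     - - creates ranges (only when between two characters)
--
--     Args:
--         chars (str): Characters to escape for use in character class.
--
--     Returns:
--         str: Escaped characters safe for use in [].
--
--     Raises:
--         ValueError: If chars contains null characters or is empty.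
--     """
--     if not chars:
--         raise ValueError("Cannot escape empty character string")
--
--     if '\x00' in chars:
--         raise ValueError("Null character (\\x00) not allowed in character class")
--
--     # Check for non-ASCII characters and warn if found
--     try:
--         chars.encode('ascii')
--     except UnicodeEncodeError:
--         import warnings
--         non_ascii = [c for c in chars if ord(c) > 127]
--         warnings.warn(
--             f"Non-ASCII characters detected: {non_ascii}. "
--             "Ensure proper encoding handling in your regex engine.",
--             UserWarning,
--             stacklevel=3
--         )
--
--     escaped = ""
--     for i, char in enumerate(chars):
--         if char == ']':
--             # ] always needs escaping inside character class
--             escaped += r'\]'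
--         elif char == '\\':
--             # \ always needs escaping
--             escaped += r'\\'
--         elif char == '^' and i == 0:
--             # ^ only needs escaping if it's the first character (negation)
--             escaped += r'\^'
--         elif char == '-' and 0 < i < len(chars) - 1:
--             # - only needs escaping if it's in the middle (could be interpreted as range)
--             escaped += r'\-'
--         else:
--             # All other characters are safe in character classes
--             escaped += char
--
--     return escaped
-- ===== SOURCE B (Python) =====
-- def _escape_char_class_chars(chars: str) -> str:
--     if not chars:
--         raise ValueError("Cannot escape empty character string")
--
--     if '\x00' in chars:
--         raise ValueError("Null character (\\x00) not allowed in character class")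
--
--     # (A additionally emits a UserWarning for non-ASCII input; the return value is unaffected.)
--
--     # Three-region decomposition: first char, interior, last char.
--     first = '\\' + chars[0] if chars[0] in ']\\^' else chars[0]
--     if len(chars) == 1:
--         return first
--     interior = ''.join('\\' + c if c in ']\\-' else c for c in chars[1:-1])
--     last = '\\' + chars[-1] if chars[-1] in ']\\' else chars[-1]
--     return first + interior + last
-- ===== Notes on version B (the rewrite author's own statement) =====
-- stated objective: simpler
-- what changed: Replaces the index-tracking enumerate loop with an index-free three-region decomposition (first char / interior via a join over chars[1:-1] / last char), avoiding per-character index comparisons and quadratic-prone += string building.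
-- outside the precondition, e.g. on _escape_char_class_chars(''): A raises ValueError, B raises ValueError
import Mathlib
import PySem

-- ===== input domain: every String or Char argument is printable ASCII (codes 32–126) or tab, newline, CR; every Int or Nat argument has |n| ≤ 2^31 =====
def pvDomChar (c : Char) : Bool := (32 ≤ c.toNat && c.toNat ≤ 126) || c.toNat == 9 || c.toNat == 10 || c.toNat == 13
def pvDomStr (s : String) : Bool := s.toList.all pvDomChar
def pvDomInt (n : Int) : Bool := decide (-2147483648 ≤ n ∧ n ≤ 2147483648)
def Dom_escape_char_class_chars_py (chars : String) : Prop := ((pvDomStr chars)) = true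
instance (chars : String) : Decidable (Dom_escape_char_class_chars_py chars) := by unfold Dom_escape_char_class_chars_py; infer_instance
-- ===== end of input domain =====

-- B replaces A's index-tracking loop by a three-region split (first char / interior / last char); objective: simpler.
-- ===== PORT A =====
-- one step of A's 'for i, char in enumerate(chars)' loop (accumulator kept as List Char)
def escAStep (n : Int) (acc : List Char) (p : Int × Char) : List Char :=
  if p.2 = ']' then acc ++ ['\\', ']']
  else if p.2 = '\\' then acc ++ ['\\', '\\']
  else if p.2 = '^' ∧ p.1 = 0 then acc ++ ['\\', '^']
  else if p.2 = '-' ∧ 0 < p.1 ∧ p.1 < n - 1 then acc ++ ['\\', '-']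
  else acc ++ [p.2]

def escape_char_class_chars_py (chars : String) : String :=
  String.ofList ((PySem.List.enumerate chars.toList 0).foldl
    (escAStep (chars.toList.length : Int)) [])

-- ===== PORT B =====
def escFirstC (c : Char) : List Char := if c = ']' ∨ c = '\\' ∨ c = '^' then ['\\', c] else [c]
def escMidC (c : Char) : List Char := if c = ']' ∨ c = '\\' ∨ c = '-' then ['\\', c] else [c]
def escLastC (c : Char) : List Char := if c = ']' ∨ c = '\\' then ['\\', c] else [c]

def escape_char_class_chars_py_alt (chars : String) : String :=
  match chars.toList with
  | [] => ""   -- unreachable under Pre_ (A raises on the empty string)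
  | [c] => String.ofList (escFirstC c)
  | c :: d :: rest =>
      String.ofList (escFirstC c ++ ((d :: rest).dropLast.flatMap escMidC)
                 ++ escLastC ((d :: rest).getLast (by simp)))

-- ===== PRECONDITION & SPEC =====
-- Pre_ excludes only the empty string, on which A raises ValueError (the null-character raise lies outside Dom).
def Pre_escape_char_class_chars_py (chars : String) : Prop := chars ≠ ""
instance (chars : String) : Decidable (Pre_escape_char_class_chars_py chars) := by unfold Pre_escape_char_class_chars_py; infer_instance
def pvWitness_escape_char_class_chars_py : String := "a-b^]"

def Spec_escape_char_class_chars_py (chars : String) (out : String) : Prop := out = escape_char_class_chars_py_alt chars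
instance (chars : String) (out : String) : Decidable (Spec_escape_char_class_chars_py chars out) := by unfold Spec_escape_char_class_chars_py; infer_instance

-- ===== CLAIM (what is proved, stated in full; the proofs are below) =====
def Claim_equal_escape_char_class_chars_py : Prop := ∀ (chars : String), Dom_escape_char_class_chars_py chars → Pre_escape_char_class_chars_py chars → Spec_escape_char_class_chars_py chars (escape_char_class_chars_py chars)

-- ===== LEMMAS AND PROOFS =====

-- A's per-character contribution, as a function of the index
def escA (n : Int) (p : Int × Char) : List Char := escAStep n [] p

lemma escAStep_eq_append (n : Int) (acc : List Char) (p : Int × Char) :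
    escAStep n acc p = acc ++ escA n p := by
  unfold escA escAStep; split_ifs <;> simp

lemma foldA_flatMap (n : Int) (l : List (Int × Char)) (acc : List Char) :
    l.foldl (escAStep n) acc = acc ++ l.flatMap (escA n) := by
  induction l generalizing acc with
  | nil => simp
  | cons p ps ih => rw [List.foldl_cons, escAStep_eq_append, ih, List.flatMap_cons, List.append_assoc]

lemma escA_first (n : Int) (c : Char) : escA n (0, c) = escFirstC c := by
  unfold escA escAStep escFirstC
  split_ifs with h1 h2 h3 h4 <;> simp_all

lemma escA_mid (n i : Int) (c : Char) (h0 : 0 < i) (h1 : i < n - 1) :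
    escA n (i, c) = escMidC c := by
  unfold escA escAStep escMidC
  split_ifs with h1' h2 h3 h4 <;> simp_all

lemma escA_last (n i : Int) (c : Char) (h0 : 0 < i) (h1 : ¬ i < n - 1) :
    escA n (i, c) = escLastC c := by
  unfold escA escAStep escLastC
  split_ifs with h1' h2 h3 h4 <;> simp_all

lemma flatMap_enum_mid (n : Int) (mid : List Char) (s : Int)
    (hs : 0 < s) (hb : s + mid.length ≤ n - 1) :
    (PySem.List.enumerate mid s).flatMap (escA n) = mid.flatMap escMidC := by
  induction mid generalizing s with
  | nil => simp [PySem.List.enumerate_nil]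
  | cons m ms ih =>
      rw [PySem.List.enumerate_cons]
      simp only [List.flatMap_cons]
      rw [escA_mid n s m hs (by simp at hb; omega), ih (s + 1) (by omega) (by simp at hb ⊢; omega)]

lemma toList_ne_nil (chars : String) (h : chars ≠ "") : chars.toList ≠ [] := by
  intro hn
  exact h (String.toList_eq_nil_iff.mp hn)

-- ===== VERDICT (by name: the statement is the Claim_ definition above) =====
theorem escape_char_class_chars_py_spec : Claim_equal_escape_char_class_chars_py := by
  intro chars _ hpre
  unfold Spec_escape_char_class_chars_py escape_char_class_chars_py escape_char_class_chars_py_alt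
  have hne := toList_ne_nil chars hpre
  rcases hl : chars.toList with _ | ⟨c, rest⟩
  · exact absurd hl hne
  rcases rest with _ | ⟨d, rest'⟩
  · -- single character
    rw [PySem.List.enumerate_cons, PySem.List.enumerate_nil]
    simp only [List.foldl_cons, List.foldl_nil]
    rw [escAStep_eq_append, escA_first]
    simp
  · -- at least two characters: split d :: rest' = mid ++ [last]
    rcases List.eq_nil_or_concat (d :: rest') with h | ⟨mid, last, hconcat⟩
    · simp at h
    rw [hconcat]
    simp only [List.concat_eq_append]
    rw [foldA_flatMap]
    have hn : ((c :: (mid ++ [last])).length : Int) = (mid.length : Int) + 2 := by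
      simp; omega
    rw [PySem.List.enumerate_cons]
    simp only [List.flatMap_cons, List.nil_append, zero_add]
    rw [PySem.List.enumerate_append]
    rw [List.flatMap_append]
    rw [escA_first]
    rw [flatMap_enum_mid _ mid 1 (by omega) (by rw [hn]; omega)]
    rw [PySem.List.enumerate_cons, PySem.List.enumerate_nil]
    simp only [List.flatMap_cons, List.flatMap_nil, List.append_nil]
    rw [escA_last _ _ _ (by omega) (by rw [hn]; omega)]
    rcases mid with _ | ⟨m, ms⟩
    · simp
    · have hd : (m :: (ms ++ [last])).dropLast = m :: ms := by
        rw [show m :: (ms ++ [last]) = (m :: ms) ++ [last] from rfl,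
            List.dropLast_concat]
      simp [hd]
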